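-- pv_equiv track=rewrite | github.com/Enoch-H-Kang/GEPA_suite | hover/hover_program.py | _format_passages
-- ===== SOURCE A (Python) =====
-- from typing import List, Dict, Tuple
--
-- def _format_passages(passages: List[str], max_chars: int = 4000) -> str:
--     # Keep it bounded; long-context can balloon.
--     out = []
--     total = 0
--     for i, p in enumerate(passages, 1):
--         chunk = f"[{i}] {p}"
--         if total + len(chunk) > max_chars:
--             break
--         out.append(chunk)
--         total += len(chunk)
--     return "\n".join(out)
-- ===== SOURCE B (Python) =====
-- from typing import List, Dict, Tuple
--
-- def _format_passages(passages: List[str], max_chars: int = 4000) -> str: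
--     # Precompute all indexed chunks, then cumulative lengths, then keep the
--     # longest prefix whose running total stays within the budget.
--     chunks = [f"[{i}] {p}" for i, p in enumerate(passages, 1)]
--     total = 0
--     cums = [total := total + len(c) for c in chunks]
--     keep = next((k for k, t in enumerate(cums) if t > max_chars), len(chunks))
--     return "\n".join(chunks[:keep])
-- ===== Notes on version B (the rewrite author's own statement) =====
-- stated objective: alternative
-- what changed: Replaces the single greedy accumulate-and-break loop by a three-stage pipeline: build all indexed chunks, compute cumulative lengths, then cut at the first cumulative length exceeding the budget and join that prefix.
import Mathlib
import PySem

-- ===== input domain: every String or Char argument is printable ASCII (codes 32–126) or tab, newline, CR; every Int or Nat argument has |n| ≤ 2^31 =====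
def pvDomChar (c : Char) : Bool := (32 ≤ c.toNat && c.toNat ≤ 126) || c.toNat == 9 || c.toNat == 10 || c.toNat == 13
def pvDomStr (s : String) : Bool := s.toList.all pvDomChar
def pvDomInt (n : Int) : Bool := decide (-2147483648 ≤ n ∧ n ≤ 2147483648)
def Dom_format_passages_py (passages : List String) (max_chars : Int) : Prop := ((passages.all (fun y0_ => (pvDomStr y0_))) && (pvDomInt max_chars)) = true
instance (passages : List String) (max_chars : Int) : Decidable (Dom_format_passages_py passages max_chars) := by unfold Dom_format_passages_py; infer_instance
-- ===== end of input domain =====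

-- B replaces A's greedy accumulate-and-break loop by a chunks / cumulative-lengths / cut-prefix pipeline (alternative decomposition, same cost).


-- ===== PORT A =====
-- A's loop: running 1-based index i, running total; break on the first chunk that would overflow.
def pvALoop (max_chars : Int) : List String → Int → Int → List String
  | [], _, _ => []
  | p :: rest, i, total =>
    let chunk := "[" ++ PySem.Int.toStr i ++ "] " ++ p
    if total + (PySem.Str.len chunk : Int) > max_chars then []
    else chunk :: pvALoop max_chars rest (i + 1) (total + (PySem.Str.len chunk : Int))

def format_passages_py (passages : List String) (max_chars : Int) : String :=
  PySem.Str.join "\n" (pvALoop max_chars passages 1 0)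

-- ===== PORT B =====
-- chunks = [f"[{i}] {p}" …]
def pvBChunks : List String → Int → List String
  | [], _ => []
  | p :: rest, i => ("[" ++ PySem.Int.toStr i ++ "] " ++ p) :: pvBChunks rest (i + 1)

-- cums = running cumulative lengths
def pvBCums : List String → Int → List Int
  | [], _ => []
  | c :: rest, t => (t + (PySem.Str.len c : Int)) :: pvBCums rest (t + (PySem.Str.len c : Int))

def format_passages_py_alt (passages : List String) (max_chars : Int) : String :=
  let chunks := pvBChunks passages 1
  let cums := pvBCums chunks 0
  let keep := (cums.findIdx? (fun t => t > max_chars)).getD chunks.length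
  PySem.Str.join "\n" (chunks.take keep)

-- ===== PRECONDITION & SPEC =====
def Spec_format_passages_py (passages : List String) (max_chars : Int) (out : String) : Prop := out = format_passages_py_alt passages max_chars
instance (passages : List String) (max_chars : Int) (out : String) : Decidable (Spec_format_passages_py passages max_chars out) := by unfold Spec_format_passages_py; infer_instance

-- ===== CLAIM (what is proved, stated in full; the proofs are below) =====
def Claim_equal_format_passages_py : Prop := ∀ (passages : List String) (max_chars : Int), Dom_format_passages_py passages max_chars → Spec_format_passages_py passages max_chars (format_passages_py passages max_chars)

-- ===== LEMMAS AND PROOFS =====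
lemma pvKey (mx : Int) : ∀ (ps : List String) (i total : Int),
    pvALoop mx ps i total =
      (pvBChunks ps i).take
        (((pvBCums (pvBChunks ps i) total).findIdx? (fun t => t > mx)).getD (pvBChunks ps i).length) := by
  intro ps
  induction ps with
  | nil => intro i total; simp [pvALoop, pvBChunks, pvBCums]
  | cons p rest ih =>
    intro i total
    simp only [pvALoop, pvBChunks, pvBCums, List.findIdx?_cons, decide_eq_true_eq]
    rw [ih]
    generalize (PySem.Str.len ("[" ++ PySem.Int.toStr i ++ "] " ++ p) : Int) = L
    by_cases h : total + L > mx
    · rw [if_pos h, if_pos h]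
      rfl
    · rw [if_neg h, if_neg h]
      cases (pvBCums (pvBChunks rest (i + 1)) (total + L)).findIdx? (fun t => t > mx) with
      | none => simp [List.take_succ_cons]
      | some k => simp [List.take_succ_cons]

-- ===== VERDICT (by name: the statement is the Claim_ definition above) =====
theorem format_passages_py_spec : Claim_equal_format_passages_py := by
  intro passages max_chars _
  unfold Spec_format_passages_py format_passages_py format_passages_py_alt
  rw [pvKey]
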